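-- pv_equiv track=rewrite | github.com/Bharath-kolekar/cogone | backend/app/services/ai_agent_maximum_consistency_service.py | _extract_semantic_concepts
-- ===== SOURCE A (Python) =====
-- def _extract_semantic_concepts(text: str) -> set:
--     """Extract semantic concepts from text"""
--     concepts = set()
--     words = text.lower().split()
--
--     # Common semantic concept indicators
--     concept_indicators = [
--         "concept", "idea", "notion", "principle", "theory", "method",
--         "approach", "strategy", "technique", "process", "system",
--         "framework", "model", "structure", "pattern", "template"
--     ]
--
--     for word in words:
--         if word in concept_indicators:
--             concepts.add(word)
--
--     return concepts
-- ===== SOURCE B (Python) =====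
-- def _extract_semantic_concepts(text: str) -> set:
--     """Extract semantic concepts from text"""
--     concept_indicators = frozenset((
--         "concept", "idea", "notion", "principle", "theory", "method",
--         "approach", "strategy", "technique", "process", "system",
--         "framework", "model", "structure", "pattern", "template"))
--     concepts = set()
--     token = []
--     for ch in (text + " ").lower():
--         if ch.isspace():
--             if token:
--                 word = "".join(token)
--                 if word in concept_indicators:
--                     concepts.add(word)
--                 token = []
--         else:
--             token.append(ch)
--     return concepts
-- ===== Notes on version B (the rewrite author's own statement) =====
-- stated objective: alternative
-- what changed: Replaced split()-then-filter (build the whole word list, then a per-word membership loop) by a single-pass character-level tokenizer: one scan over the padded lowercased text with an explicit token accumulator that is flushed against a frozenset at each whitespace boundary, never materialising the word list.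
import Mathlib
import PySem

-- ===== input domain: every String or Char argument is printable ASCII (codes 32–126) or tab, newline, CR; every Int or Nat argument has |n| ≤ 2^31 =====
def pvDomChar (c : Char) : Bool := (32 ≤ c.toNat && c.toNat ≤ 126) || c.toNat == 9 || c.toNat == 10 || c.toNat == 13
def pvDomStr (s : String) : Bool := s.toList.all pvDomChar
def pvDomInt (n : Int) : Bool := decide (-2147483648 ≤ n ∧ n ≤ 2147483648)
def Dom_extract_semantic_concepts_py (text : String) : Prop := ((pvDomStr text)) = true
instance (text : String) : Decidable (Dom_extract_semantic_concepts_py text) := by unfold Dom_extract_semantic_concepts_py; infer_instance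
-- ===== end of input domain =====

-- B replaces split()-then-filter by a single-pass character-level tokenizer with an explicit
-- token accumulator, flushed against a frozenset at each whitespace boundary (alternative algorithm, same result).

-- ===== PORT A =====
-- A's inline list of concept indicators, a plain Python list.
def pvConceptIndicatorsA : List String :=
  ["concept", "idea", "notion", "principle", "theory", "method",
   "approach", "strategy", "technique", "process", "system",
   "framework", "model", "structure", "pattern", "template"]

def extract_semantic_concepts_py (text : String) : List String :=
  let words := PySem.Str.split₀ (PySem.Str.lower text)
  words.foldl
    (fun concepts word =>
      if pvConceptIndicatorsA.contains word then PySem.Set.add concepts word else concepts)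
    PySem.Set.empty

-- ===== PORT B =====
-- B's frozenset of concept indicators (consumed only through membership).
def pvConceptIndicatorsB : PySem.Set String :=
  PySem.Set.ofList
    ["concept", "idea", "notion", "principle", "theory", "method",
     "approach", "strategy", "technique", "process", "system",
     "framework", "model", "structure", "pattern", "template"]

-- one loop iteration of B's scanner: state = (concepts, token); Python's token list of chars is a List Char.
def pvStepB (st : PySem.Set String × List Char) (ch : Char) : PySem.Set String × List Char :=
  if PySem.Chars.isspace ch then
    if st.2.isEmpty then st
    else
      let word := String.ofList st.2               -- "".join(token)
      (if pvConceptIndicatorsB.contains word then PySem.Set.add st.1 word else st.1, [])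
  else (st.1, st.2 ++ [ch])

def extract_semantic_concepts_py_alt (text : String) : List String :=
  ((PySem.Str.lower (text ++ " ")).toList.foldl pvStepB (PySem.Set.empty, [])).1

-- ===== PRECONDITION & SPEC =====
def Spec_extract_semantic_concepts_py (text : String) (out : List String) : Prop := out = extract_semantic_concepts_py_alt text
instance (text : String) (out : List String) : Decidable (Spec_extract_semantic_concepts_py text out) := by unfold Spec_extract_semantic_concepts_py; infer_instance

-- ===== CLAIM (what is proved, stated in full; the proofs are below) =====
def Claim_equal_extract_semantic_concepts_py : Prop := ∀ (text : String), Dom_extract_semantic_concepts_py text → Spec_extract_semantic_concepts_py text (extract_semantic_concepts_py text)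

-- ===== LEMMAS AND PROOFS =====

-- A's loop body, as a function of the accumulated set.
def pvFilterA (s : PySem.Set String) (w : String) : PySem.Set String :=
  if pvConceptIndicatorsA.contains w then PySem.Set.add s w else s

theorem pv_inds_eq : pvConceptIndicatorsB = pvConceptIndicatorsA := by decide

-- split₀.go's accumulator is just prepended output.
theorem pv_go_acc (cs : List Char) :
    ∀ cur acc, PySem.Chars.split₀.go cs cur acc =
      acc.reverse ++ PySem.Chars.split₀.go cs cur [] := by
  induction cs with
  | nil =>
      intro cur acc
      simp only [PySem.Chars.split₀.go]
      by_cases h : cur.isEmpty <;> simp [h]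
  | cons c cs ih =>
      intro cur acc
      simp only [PySem.Chars.split₀.go]
      by_cases hs : PySem.Chars.isspace c
      · by_cases h : cur.isEmpty
        · simpa [hs, h] using ih [] acc
        · simp only [hs, h, if_true, Bool.false_eq_true, if_false]
          rw [ih [] (cur.reverse :: acc), ih [] [cur.reverse]]
          simp
      · simp only [hs, Bool.false_eq_true, if_false]
        exact ih (c :: cur) acc

-- main invariant: B's scanner over cs ++ [' '] with pending token tok computes A's fold
-- over the words split₀ finds in cs with reversed current token tok.reverse.
theorem pv_scan_eq_fold (cs : List Char) :
    ∀ (tok : List Char) (s : PySem.Set String),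
      ((cs ++ [' ']).foldl pvStepB (s, tok)).1 =
        ((PySem.Chars.split₀.go cs tok.reverse []).map String.ofList).foldl pvFilterA s := by
  induction cs with
  | nil =>
      intro tok s
      simp only [List.nil_append, List.foldl_cons, List.foldl_nil, pvStepB]
      have hs : PySem.Chars.isspace ' ' = true := by decide
      rw [hs]; simp only [if_true]
      by_cases h : tok.isEmpty
      · have htok : tok = [] := by simpa [List.isEmpty_iff] using h
        subst htok
        simp [PySem.Chars.split₀.go]
      · have hne : tok ≠ [] := by simpa [List.isEmpty_iff] using h
        have hr : tok.reverse.isEmpty = false := by simp [hne]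
        simp only [h, Bool.false_eq_true, if_false, PySem.Chars.split₀.go, hr]
        simp [pvFilterA, pv_inds_eq]
  | cons c cs ih =>
      intro tok s
      simp only [List.cons_append, List.foldl_cons]
      by_cases hs : PySem.Chars.isspace c
      · by_cases h : tok.isEmpty
        · have htok : tok = [] := by simpa [List.isEmpty_iff] using h
          subst htok
          simp only [pvStepB, hs, if_true]
          simpa [PySem.Chars.split₀.go, hs] using ih [] s
        · have hne : tok ≠ [] := by simpa [List.isEmpty_iff] using h
          have hr : tok.reverse.isEmpty = false := by simp [hne]
          simp only [pvStepB, hs, if_true, h, Bool.false_eq_true, if_false]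
          rw [ih []]
          simp only [PySem.Chars.split₀.go, hs, hr, if_true, Bool.false_eq_true, if_false]
          rw [pv_go_acc cs [] [tok.reverse.reverse]]
          simp [pvFilterA, pv_inds_eq]
      · simp only [pvStepB, hs, Bool.false_eq_true, if_false]
        rw [ih (tok ++ [c])]
        simp only [PySem.Chars.split₀.go, hs, Bool.false_eq_true, if_false]
        simp

theorem extract_semantic_concepts_py_spec : Claim_equal_extract_semantic_concepts_py := by
  intro text _
  unfold Spec_extract_semantic_concepts_py extract_semantic_concepts_py extract_semantic_concepts_py_alt
  have hsp : PySem.Chars.lowerChar ' ' = ' ' := by decide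
  have hpad : (PySem.Str.lower (text ++ " ")).toList
      = PySem.Chars.lower text.toList ++ [' '] := by
    simp [PySem.Chars.lower, hsp]
  rw [hpad, pv_scan_eq_fold]
  simp only [PySem.Str.split₀, List.reverse_nil]
  have : (PySem.Str.lower text).toList = PySem.Chars.lower text.toList := by simp
  rw [this]
  rfl
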